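-- pv_equiv track=rewrite | github.com/phamvh/pythonProject | algos/ribbon_cutting.py | solution
-- ===== SOURCE A (Python) =====
-- def ribbons(num, size):
--     return num // size
--
-- def solution(a, k):
--     if not a:
--         return 0
--     m = max(a)
--     l = 0
--     for size in range(1, m):
--         count = 0
--         for n in a:
--             count += ribbons(n, size)
--             if count >= k:
--                 l = size
--     return l
-- ===== SOURCE B (Python) =====
-- def solution(a, k):
--     if not a:
--         return 0
--     best = 0
--     lo, hi = 1, max(a) - 1
--     while lo <= hi:
--         mid = (lo + hi) // 2
--         if sum(n // mid for n in a) >= k: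
--             best = mid
--             lo = mid + 1
--         else:
--             hi = mid - 1
--     return best
-- ===== Notes on version B (the rewrite author's own statement) =====
-- stated objective: faster
-- what changed: Replaces the linear scan over all candidate sizes (each with a full pass over the list) by a binary search on the size, exploiting that the total ribbon count is non-increasing in the size for nonnegative lengths.
-- outside the precondition, e.g. on solution([5, -5], 2): A returns 2, B returns 0
import Mathlib
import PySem

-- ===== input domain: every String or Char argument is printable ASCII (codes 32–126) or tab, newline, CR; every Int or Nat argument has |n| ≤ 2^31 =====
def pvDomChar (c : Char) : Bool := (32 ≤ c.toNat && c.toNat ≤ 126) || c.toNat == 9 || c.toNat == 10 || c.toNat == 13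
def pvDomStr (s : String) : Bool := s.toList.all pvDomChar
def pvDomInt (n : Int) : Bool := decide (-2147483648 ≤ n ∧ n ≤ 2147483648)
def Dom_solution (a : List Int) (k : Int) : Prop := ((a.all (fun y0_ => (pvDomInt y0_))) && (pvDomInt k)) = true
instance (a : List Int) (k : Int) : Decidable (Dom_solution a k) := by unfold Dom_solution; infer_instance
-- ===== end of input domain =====

-- B replaces A's linear scan over every candidate size by a binary search on the size
-- (the total ribbon count is non-increasing in the size on nonnegative lengths): faster.


-- ===== PORT A =====
-- ribbons(num, size) = num // size
def ribbons (num size : Int) : Int := PySem.Int.floordiv num size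

def solution (a : List Int) (k : Int) : Int :=
  if a = [] then 0
  else
    let m := (PySem.List.max? a (fun x => x)).getD 0
    (PySem.List.pyRange 1 m 1).foldl
      (fun l size =>
        (a.foldl
          (fun (p : Int × Int) n =>
            if p.1 + ribbons n size ≥ k then (p.1 + ribbons n size, size)
            else (p.1 + ribbons n size, p.2))
          (0, l)).2)
      0

-- ===== PORT B =====
-- the while-loop of Source B: binary search for the largest mid with sum(n // mid for n in a) >= k
def altLoop (a : List Int) (k : Int) (lo hi best : Int) : Int :=
  if h : lo ≤ hi then
    let mid := PySem.Int.floordiv (lo + hi) 2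
    if (a.map (fun n => PySem.Int.floordiv n mid)).sum ≥ k then
      altLoop a k (mid + 1) hi mid
    else
      altLoop a k lo (mid - 1) best
  else best
termination_by (hi + 1 - lo).toNat
decreasing_by
  · have hb := PySem.Int.floordiv_two_mid_bounds h
    simp only [mid] at *
    omega
  · have hb := PySem.Int.floordiv_two_mid_bounds h
    simp only [mid] at *
    omega

def solution_alt (a : List Int) (k : Int) : Int :=
  if a = [] then 0
  else altLoop a k 1 ((PySem.List.max? a (fun x => x)).getD 0 - 1) 0

-- ===== PRECONDITION & SPEC =====
-- Pre_ restricts to the natural domain of the task (ribbon lengths are nonnegative); on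
-- negative lengths A's mid-loop '>=' check makes the result depend on element order, an
-- artefact of A's implementation that a count-based reformulation cannot share.
def Pre_solution (a : List Int) (k : Int) : Prop := ∀ x ∈ a, 0 ≤ x
instance (a : List Int) (k : Int) : Decidable (Pre_solution a k) := by unfold Pre_solution; infer_instance

def pvWitness_solution : List Int × Int := ([4, 2, 7], 3)

def Spec_solution (a : List Int) (k : Int) (out : Int) : Prop := out = solution_alt a k
instance (a : List Int) (k : Int) (out : Int) : Decidable (Spec_solution a k out) := by unfold Spec_solution; infer_instance

-- ===== CLAIM (what is proved, stated in full; the proofs are below) =====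
def Claim_equal_solution : Prop := ∀ (a : List Int) (k : Int), Dom_solution a k → Pre_solution a k → Spec_solution a k (solution a k)

-- ===== LEMMAS AND PROOFS =====

-- total ribbon count at a given size
def pvCnt (a : List Int) (s : Int) : Int := (a.map (fun n => PySem.Int.floordiv n s)).sum

-- A's reduced per-size step
def pvStep (a : List Int) (k l s : Int) : Int := if k ≤ pvCnt a s then s else l

theorem pvCnt_nonneg (a : List Int) (s : Int) (hs : 0 < s) (ha : ∀ x ∈ a, 0 ≤ x) :
    0 ≤ pvCnt a s := by
  unfold pvCnt
  induction a with
  | nil => simp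
  | cons x t ih =>
    simp only [List.map_cons, List.sum_cons]
    have hx : 0 ≤ PySem.Int.floordiv x s := by
      rw [PySem.Int.floordiv_eq_ediv_of_pos hs]
      exact Int.ediv_nonneg (ha x (by simp)) (le_of_lt hs)
    have ht : 0 ≤ (t.map (fun n => PySem.Int.floordiv n s)).sum :=
      ih (fun y hy => ha y (by simp [hy]))
    omega

-- pvCnt is antitone in the size (on nonnegative lengths)
theorem pvCnt_antitone (a : List Int) (s s' : Int) (hs : 0 < s) (hss : s ≤ s')
    (ha : ∀ x ∈ a, 0 ≤ x) : pvCnt a s' ≤ pvCnt a s := by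
  unfold pvCnt
  induction a with
  | nil => simp
  | cons x t ih =>
    simp only [List.map_cons, List.sum_cons]
    have hx : PySem.Int.floordiv x s' ≤ PySem.Int.floordiv x s := by
      have hs' : (0 : Int) < s' := lt_of_lt_of_le hs hss
      have hq : 0 ≤ PySem.Int.floordiv x s' := by
        rw [PySem.Int.floordiv_eq_ediv_of_pos hs']
        exact Int.ediv_nonneg (ha x (by simp)) (le_of_lt hs')
      rw [PySem.Int.le_floordiv_iff_mul_le hs]
      have h1 : PySem.Int.floordiv x s' * s' ≤ x := by
        have := PySem.Int.floordiv_mul_add_mod x s'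
        have := PySem.Int.mod_nonneg x hs'
        omega
      calc PySem.Int.floordiv x s' * s ≤ PySem.Int.floordiv x s' * s' := by
            exact mul_le_mul_of_nonneg_left hss hq
        _ ≤ x := h1
    have ht := ih (fun y hy => ha y (by simp [hy]))
    omega

-- A's inner loop computes the running total and sets l iff the final total reaches k
theorem inner_loop_eq (k s : Int) (hs : 0 < s) :
    ∀ (xs : List Int), (∀ x ∈ xs, 0 ≤ x) → ∀ (c0 l0 : Int), 0 ≤ c0 →
      xs.foldl (fun (p : Int × Int) n =>
          if p.1 + ribbons n s ≥ k then (p.1 + ribbons n s, s)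
          else (p.1 + ribbons n s, p.2)) (c0, l0)
        = (c0 + pvCnt xs s, if xs ≠ [] ∧ k ≤ c0 + pvCnt xs s then s else l0) := by
  intro xs
  induction xs with
  | nil => intro _ c0 l0 _; simp [pvCnt]
  | cons x t ih =>
    intro hxs c0 l0 hc0
    have hx : 0 ≤ x := hxs x (by simp)
    have ht : ∀ y ∈ t, 0 ≤ y := fun y hy => hxs y (by simp [hy])
    have hfx : 0 ≤ ribbons x s := by
      unfold ribbons
      rw [PySem.Int.floordiv_eq_ediv_of_pos hs]
      exact Int.ediv_nonneg hx (le_of_lt hs)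
    have hcnt : pvCnt (x :: t) s = ribbons x s + pvCnt t s := by
      simp [pvCnt, ribbons]
    have htn : 0 ≤ pvCnt t s := pvCnt_nonneg t s hs ht
    simp only [List.foldl_cons]
    by_cases hk : c0 + ribbons x s ≥ k
    · rw [if_pos hk, ih ht _ s (by omega)]
      have hcond : (x :: t ≠ []) ∧ k ≤ c0 + pvCnt (x :: t) s :=
        ⟨by simp, by rw [hcnt]; omega⟩
      rw [if_pos hcond, ite_self]
      simp only [Prod.mk.injEq]
      exact ⟨by rw [hcnt]; ring, trivial⟩
    · rw [if_neg hk, ih ht _ l0 (by omega)]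
      simp only [Prod.mk.injEq]
      refine ⟨by rw [hcnt]; ring, ?_⟩
      have hnilcnt : pvCnt ([] : List Int) s = 0 := by simp [pvCnt]
      have hiff : (t ≠ [] ∧ k ≤ c0 + ribbons x s + pvCnt t s)
          ↔ (x :: t ≠ [] ∧ k ≤ c0 + pvCnt (x :: t) s) := by
        rw [hcnt]
        constructor
        · rintro ⟨_, h2⟩; exact ⟨by simp, by omega⟩
        · rintro ⟨_, h2⟩
          refine ⟨?_, by omega⟩
          intro ht0
          rw [ht0, hnilcnt] at h2
          omega
      exact if_congr hiff rfl rfl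

-- a fold of pvStep over sizes none of which reach k leaves the accumulator unchanged
theorem fold_step_id (a : List Int) (k : Int) :
    ∀ (l : List Int) (b : Int), (∀ s ∈ l, ¬ k ≤ pvCnt a s) →
      l.foldl (pvStep a k) b = b := by
  intro l
  induction l with
  | nil => intro b _; simp
  | cons x t ih =>
    intro b h
    simp only [List.foldl_cons, pvStep, if_neg (h x (by simp))]
    exact ih b (fun s hs => h s (by simp [hs]))

-- the binary search equals A's left-to-right fold over the whole size range
theorem altLoop_eq_fold (a : List Int) (k : Int) (ha : ∀ x ∈ a, 0 ≤ x) :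
    ∀ (n : Nat) (lo hi best : Int), (hi + 1 - lo).toNat ≤ n → 0 < lo →
      altLoop a k lo hi best
        = (PySem.List.pyRange lo (hi + 1) 1).foldl (pvStep a k) best := by
  intro n
  induction n with
  | zero =>
    intro lo hi best hle hlo
    rw [altLoop]
    simp only [dif_neg (by omega : ¬ lo ≤ hi)]
    rw [PySem.List.pyRange_one_eq_nil (by omega), List.foldl_nil]
  | succ n ih =>
    intro lo hi best hle hlo
    by_cases h : lo ≤ hi
    · rw [altLoop]
      simp only [dif_pos h]
      have hb := PySem.Int.floordiv_two_mid_bounds h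
      set m := PySem.Int.floordiv (lo + hi) 2 with hm
      by_cases hP : (a.map (fun n => PySem.Int.floordiv n m)).sum ≥ k
      · rw [if_pos hP, ih (m + 1) hi m (by omega) (by omega)]
        rw [PySem.List.pyRange_one_append lo (m + 1) (hi + 1) (by omega) (by omega),
            List.foldl_append]
        congr 1
        rw [PySem.List.pyRange_one_succ_right (by omega : lo ≤ m), List.foldl_append]
        simp only [List.foldl_cons, List.foldl_nil]
        have hP' : k ≤ pvCnt a m := hP
        simp only [pvStep, if_pos hP']
      · rw [if_neg hP, ih lo (m - 1) best (by omega) hlo]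
        rw [show m - 1 + 1 = m by ring]
        rw [PySem.List.pyRange_one_append lo m (hi + 1) (by omega) (by omega),
            List.foldl_append]
        have hnone : ∀ s ∈ PySem.List.pyRange m (hi + 1) 1, ¬ k ≤ pvCnt a s := by
          intro s hs
          rw [PySem.List.mem_pyRange_one] at hs
          intro hk
          exact hP (le_trans hk (pvCnt_antitone a m s (by omega) hs.1 ha))
        rw [fold_step_id a k (PySem.List.pyRange m (hi + 1) 1) _ hnone]
    · rw [altLoop]
      simp only [dif_neg h]
      rw [PySem.List.pyRange_one_eq_nil (by omega), List.foldl_nil]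

-- ===== VERDICT (by name: the statement is the Claim_ definition above) =====
theorem solution_spec : Claim_equal_solution := by
  intro a k _ hpre
  unfold Spec_solution solution solution_alt
  by_cases hnil : a = []
  · simp [hnil]
  · simp only [if_neg hnil]
    set m0 := (PySem.List.max? a (fun x => x)).getD 0 with hm0
    rw [altLoop_eq_fold a k hpre (m0 - 1 + 1 - 1).toNat 1 (m0 - 1) 0 (by omega) (by omega)]
    rw [show m0 - 1 + 1 = m0 by ring]
    apply PySem.List.foldl_congr_mem
    intro l s hs
    rw [PySem.List.mem_pyRange_one] at hs
    rw [inner_loop_eq k s (by omega) a hpre 0 l (le_refl 0)]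
    simp [pvStep, hnil]
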